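-- pv_equiv track=rewrite | github.com/lak-git/VLSM-Calculator | vlsm.py | prefix_for_usable
-- ===== SOURCE A (Python) =====
-- def prefix_for_usable(required_usable: int) -> int:
--     """
--     Given required usable hosts, return the smallest prefix length that
--     provides >= required_usable usable hosts.
--
--     Uses typical usable-host calculation: usable = 2^host_bits - 2 (so /30 => 2 usable).
--     We avoid /31 and /32 as usable-host subnets (they have 0 usable hosts under the
--     traditional allocation approach).
--     """
--     if required_usable <= 0:
--         raise ValueError("Required usable hosts must be >= 1")
--
--     # host_bits ranges from 2 (for /30) up to 30 (for /2)
--     for host_bits in range(2, 31):  # host_bits = 32 - prefixlen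
--         usable = (1 << host_bits) - 2
--         if usable >= required_usable:
--             return 32 - host_bits
--
--     raise ValueError("Requirement too large to fit in IPv4")
-- ===== SOURCE B (Python) =====
-- def prefix_for_usable(required_usable: int) -> int:
--     if required_usable <= 0:
--         raise ValueError("Required usable hosts must be >= 1")
--     host_bits = max(2, (required_usable + 1).bit_length())
--     if host_bits > 30:
--         raise ValueError("Requirement too large to fit in IPv4")
--     return 32 - host_bits
-- ===== Notes on version B (the rewrite author's own statement) =====
-- stated objective: simpler
-- what changed: Replaces the 29-step scan over host_bits with a closed-form bit_length computation (smallest h with 2^h >= required_usable+2), keeping the same ValueError guards.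
import Mathlib
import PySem

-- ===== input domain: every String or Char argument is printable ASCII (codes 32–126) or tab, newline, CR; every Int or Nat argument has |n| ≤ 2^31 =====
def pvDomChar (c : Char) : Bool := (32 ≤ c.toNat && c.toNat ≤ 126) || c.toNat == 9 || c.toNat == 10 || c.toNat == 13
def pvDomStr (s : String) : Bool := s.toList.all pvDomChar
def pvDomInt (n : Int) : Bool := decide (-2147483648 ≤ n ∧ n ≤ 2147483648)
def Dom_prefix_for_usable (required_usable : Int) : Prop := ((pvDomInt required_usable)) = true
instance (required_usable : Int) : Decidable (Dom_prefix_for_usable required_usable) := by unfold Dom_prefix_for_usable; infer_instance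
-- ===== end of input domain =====

-- B replaces A's 29-step scan with the closed-form bit_length formula; objective: simpler.

-- ===== PORT A =====
-- the for-loop with early return: first host_bits in range(2,31) whose usable count suffices
-- ((1 <<< host_bits) = 2 ^ host_bits on these nonnegative values)
def pvLoopA (required_usable : Int) : List Int → Option Int
  | [] => none
  | hb :: rest =>
      if (2 : Int) ^ hb.toNat - 2 ≥ required_usable then some (32 - hb)
      else pvLoopA required_usable rest

def prefix_for_usable (required_usable : Int) : Int :=
  if required_usable ≤ 0 then 0  -- Python raises ValueError here; outside Pre_
  else
    match pvLoopA required_usable (PySem.List.pyRange 2 31 1) with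
    | some r => r
    | none => 0  -- Python raises ValueError here; outside Pre_

-- ===== PORT B =====
-- (required_usable + 1).bit_length() for a positive argument is Nat.log2 + 1 (exact there;
-- Pre_ guarantees required_usable ≥ 1)
def prefix_for_usable_alt (required_usable : Int) : Int :=
  if required_usable ≤ 0 then 0  -- Python raises ValueError here; outside Pre_
  else
    let host_bits : Int := max 2 ((Nat.log2 (required_usable + 1).toNat : Int) + 1)
    if host_bits > 30 then 0  -- Python raises ValueError here; outside Pre_
    else 32 - host_bits

-- ===== PRECONDITION & SPEC =====
-- Pre_ is exactly the set where A returns: A raises ValueError for required_usable ≤ 0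
-- and for required_usable > 2^30 - 2 (too large for IPv4).
def Pre_prefix_for_usable (required_usable : Int) : Prop :=
  1 ≤ required_usable ∧ required_usable ≤ 2 ^ 30 - 2
instance (required_usable : Int) : Decidable (Pre_prefix_for_usable required_usable) := by
  unfold Pre_prefix_for_usable; infer_instance

def pvWitness_prefix_for_usable : Int := (100)

def Spec_prefix_for_usable (required_usable : Int) (out : Int) : Prop := out = prefix_for_usable_alt required_usable
instance (required_usable : Int) (out : Int) : Decidable (Spec_prefix_for_usable required_usable out) := by unfold Spec_prefix_for_usable; infer_instance

-- ===== CLAIM (what is proved, stated in full; the proofs are below) =====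
def Claim_equal_prefix_for_usable : Prop := ∀ (required_usable : Int), Dom_prefix_for_usable required_usable → Pre_prefix_for_usable required_usable → Spec_prefix_for_usable required_usable (prefix_for_usable required_usable)

-- ===== LEMMAS AND PROOFS =====

-- The loop over the tail pyRange a 31 1 returns some (32 - hb) when hb is the first
-- success point ≥ a.
lemma pvLoopA_eq (n : Int) (hb : Nat) (h30 : hb ≤ 30)
    (hlow : ∀ j : Nat, j < hb → (2 : Int) ^ j - 2 < n)
    (hhi : n ≤ 2 ^ hb - 2) :
    ∀ a : Nat, a ≤ hb →
      pvLoopA n (PySem.List.pyRange (a : Int) 31 1) = some (32 - (hb : Int)) := by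
  intro a ha
  induction hha : hb - a generalizing a with
  | zero =>
      have hab : a = hb := by omega
      subst hab
      rw [PySem.List.pyRange_one_cons (by exact_mod_cast by omega : (a : Int) < 31)]
      simp [pvLoopA, Int.toNat_natCast, hhi]
  | succ k ih =>
      have halt : a < hb := by omega
      rw [PySem.List.pyRange_one_cons (by exact_mod_cast by omega : (a : Int) < 31)]
      have hfail : ¬ ((2 : Int) ^ ((a : Int)).toNat - 2 ≥ n) := by
        simp only [Int.toNat_natCast]
        have := hlow a halt; omega
      simp only [pvLoopA, hfail, if_false]
      have : ((a : Int) + 1) = ((a + 1 : Nat) : Int) := by push_cast; ring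
      rw [this]
      exact ih (a + 1) (by omega) (by omega)

theorem prefix_for_usable_spec : Claim_equal_prefix_for_usable := by
  intro n _ hpre
  obtain ⟨h1, h2⟩ := hpre
  unfold Spec_prefix_for_usable prefix_for_usable prefix_for_usable_alt
  have hn0 : ¬ n ≤ 0 := by omega
  simp only [hn0, if_false]
  set m : Nat := (n + 1).toNat with hm
  have hmn : (m : Int) = n + 1 := by omega
  have hm2 : 2 ≤ m := by omega
  set L : Nat := Nat.log2 m with hL
  have hlog_le : 2 ^ L ≤ m := Nat.log2_self_le (by omega)
  have hlog_lt : m < 2 ^ (L + 1) := Nat.lt_log2_self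
  have hL1 : 1 ≤ L := by
    by_contra h
    have : L = 0 := by omega
    rw [this] at hlog_lt; omega
  have hL29 : L ≤ 29 := by
    by_contra h
    have h30 : 30 ≤ L := by omega
    have : (2 : Nat) ^ 30 ≤ 2 ^ L := Nat.pow_le_pow_right (by norm_num) h30
    have : (2 : Nat) ^ 30 ≤ m := le_trans this hlog_le
    omega
  -- host_bits = L + 1, and max 2 collapses since L + 1 ≥ 2
  have hb_eq : max (2 : Int) ((L : Int) + 1) = (L : Int) + 1 := by
    apply max_eq_right; exact_mod_cast by omega
  have hgt : ¬ (max (2 : Int) ((L : Int) + 1) > 30) := by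
    rw [hb_eq]; exact_mod_cast by omega
  rw [if_neg hgt]
  -- A's loop returns the same value
  have hpow : ∀ k : Nat, ((2 : Nat) ^ k : Int) = (2 : Int) ^ k := by
    intro k; push_cast; ring
  have hloop := pvLoopA_eq n (L + 1) (by omega)
    (by
      intro j hj
      have : (2 : Nat) ^ j ≤ 2 ^ L := Nat.pow_le_pow_right (by norm_num) (by omega)
      have hjm : (2 : Nat) ^ j ≤ m := le_trans this hlog_le
      have : ((2 : Nat) ^ j : Int) ≤ (m : Int) := by exact_mod_cast hjm
      rw [hpow] at this; omega)
    (by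
      have : ((m : Nat) : Int) < ((2 : Nat) ^ (L + 1) : Int) := by exact_mod_cast hlog_lt
      rw [hpow] at this; omega)
    2 (by omega)
  norm_num at hloop
  rw [hloop, hb_eq]
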